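-- pv_equiv track=rewrite | github.com/aalyth/Python-equation-solver | src/optimizing.py | reconstruct_operations
-- ===== SOURCE A (Python) =====
-- def reconstruct_operations(rpn_list):
--     result = ''.join(str(i) for i in rpn_list[0])
--
--     for i in rpn_list[1:]:
--         temp = ''
--
--         for j in i:
--             if j == '-':
--                 temp = '-' + temp
--             else:
--                 temp += str(j)
--
--         if temp[0] == '-':
--             result += temp
--         else:
--             result += '+' + temp
--
--     return result
-- ===== SOURCE B (Python) =====
-- def reconstruct_operations(rpn_list):
--     # Stable sort by boolean key moves every '-' of a segment to the front while
--     # the non-dash elements keep their relative order -- exactly what A's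
--     # prepend-on-dash loop computes.
--     head = ''.join(str(x) for x in rpn_list[0])
--     pieces = []
--     for seg in rpn_list[1:]:
--         temp = ''.join(str(x) for x in sorted(seg, key=lambda x: x != '-'))
--         pieces.append(temp if temp[0] == '-' else '+' + temp)
--     return head + ''.join(pieces)
-- ===== Notes on version B (the rewrite author's own statement) =====
-- stated objective: alternative
-- what changed: B replaces A's conditional prepend/append character-accumulation loop per segment with a stable sort by the boolean key (x != '-'), which partitions each segment into its dashes followed by the order-preserved non-dash elements, joined once; the '+'-prefixed pieces are collected in a list and joined at the end instead of A's repeated concatenation onto result.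
import Mathlib
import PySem

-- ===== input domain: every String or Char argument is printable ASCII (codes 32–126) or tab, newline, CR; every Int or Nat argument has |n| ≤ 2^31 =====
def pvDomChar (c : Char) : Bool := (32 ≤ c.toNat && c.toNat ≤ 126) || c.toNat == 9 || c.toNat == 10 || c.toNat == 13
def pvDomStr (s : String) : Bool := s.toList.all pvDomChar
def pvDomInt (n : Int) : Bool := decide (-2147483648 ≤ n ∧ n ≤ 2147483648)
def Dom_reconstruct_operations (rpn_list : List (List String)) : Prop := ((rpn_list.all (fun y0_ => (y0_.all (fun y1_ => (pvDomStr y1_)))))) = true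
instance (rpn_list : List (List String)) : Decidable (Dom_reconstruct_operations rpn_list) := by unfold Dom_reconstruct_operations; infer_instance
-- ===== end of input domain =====

-- B rebuilds each segment by STABLE-SORTING it with the boolean key (x != '-') — which moves the
-- dashes to the front keeping non-dash order — instead of A's per-character prepend/append loop
-- (objective: alternative).


-- ===== PORT A =====
def reconstruct_operations (rpn_list : List (List String)) : String :=
  match rpn_list with
  | [] => ""  -- rpn_list[0] raises IndexError; excluded by Pre_
  | h :: rest =>
    -- result = ''.join(str(i) for i in rpn_list[0])  (str is identity on str elements)
    rest.foldl (fun result i =>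
      let temp := i.foldl (fun t j => if j = "-" then "-" ++ t else t ++ j) ""
      -- temp[0]: none = IndexError, excluded by Pre_; then the value is irrelevant
      if PySem.Str.pyGet? temp 0 = some '-' then result ++ temp
      else result ++ "+" ++ temp)
      (PySem.Str.join "" h)

-- ===== PORT B =====
-- Python's boolean sort key (x != '-') is ported as the Nat key 0/1 (False < True).
def dashKey (x : String) : Nat := if x = "-" then 0 else 1
def reconstruct_operations_alt (rpn_list : List (List String)) : String :=
  match rpn_list with
  | [] => ""  -- rpn_list[0] raises IndexError; excluded by Pre_
  | h :: rest =>
    let pieces := rest.foldl (fun pieces seg =>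
      let temp := PySem.Str.join ""
        (PySem.List.sorted seg dashKey false)
      pieces ++ [if PySem.Str.pyGet? temp 0 = some '-' then temp else "+" ++ temp]) []
    PySem.Str.join "" h ++ PySem.Str.join "" pieces

-- ===== PRECONDITION & SPEC =====
-- Pre_ excludes exactly the inputs where Python A raises: the empty list (rpn_list[0] is an
-- IndexError) and inputs with a segment after the first whose elements are all '' (temp stays
-- '' so temp[0] is an IndexError). B raises on those inputs too.
def Pre_reconstruct_operations (rpn_list : List (List String)) : Prop :=
  rpn_list ≠ [] ∧ ∀ seg ∈ rpn_list.tail, ∃ e ∈ seg, e ≠ ""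
instance (rpn_list : List (List String)) : Decidable (Pre_reconstruct_operations rpn_list) := by
  unfold Pre_reconstruct_operations; infer_instance
def pvWitness_reconstruct_operations : List (List String) := [["x", "2"], ["-", "3", "y"], ["4", "-", "-", "z"]]

def Spec_reconstruct_operations (rpn_list : List (List String)) (out : String) : Prop := out = reconstruct_operations_alt rpn_list
instance (rpn_list : List (List String)) (out : String) : Decidable (Spec_reconstruct_operations rpn_list out) := by unfold Spec_reconstruct_operations; infer_instance

-- ===== CLAIM (what is proved, stated in full; the proofs are below) =====
def Claim_equal_reconstruct_operations : Prop := ∀ (rpn_list : List (List String)), Dom_reconstruct_operations rpn_list → Pre_reconstruct_operations rpn_list → Spec_reconstruct_operations rpn_list (reconstruct_operations rpn_list)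

-- ===== LEMMAS AND PROOFS =====

theorem chars_join_nil_cons (a : List Char) (l : List (List Char)) :
    PySem.Chars.join [] (a :: l) = a ++ PySem.Chars.join [] l := by
  cases l <;> simp [PySem.Chars.join, List.intercalate, List.intersperse]

theorem sjoin_nil : PySem.Str.join "" [] = "" := by
  apply String.toList_inj.mp; simp [PySem.Str.toList_join, PySem.Chars.join, List.intercalate]

theorem sjoin_cons (a : String) (l : List String) :
    PySem.Str.join "" (a :: l) = a ++ PySem.Str.join "" l := by
  apply String.toList_inj.mp
  simp [PySem.Str.toList_join, chars_join_nil_cons]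

theorem sjoin_append (l m : List String) :
    PySem.Str.join "" (l ++ m) = PySem.Str.join "" l ++ PySem.Str.join "" m := by
  induction l with
  | nil => rw [List.nil_append, sjoin_nil]; apply String.toList_inj.mp; simp
  | cons a l ih =>
    rw [List.cons_append, sjoin_cons, sjoin_cons, ih]
    apply String.toList_inj.mp; simp

-- insertBy skips a prefix it never goes before
theorem insertBy_skip (before : String → String → Bool) (x : String) (l m : List String)
    (h : ∀ y ∈ l, before x y = false) :
    PySem.List.insertBy before x (l ++ m) = l ++ PySem.List.insertBy before x m := by
  induction l with
  | nil => simp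
  | cons a l ih =>
    simp only [List.cons_append, PySem.List.insertBy]
    rw [h a (List.mem_cons_self), ih (fun y hy => h y (List.mem_cons_of_mem _ hy))]
    simp [PySem.List.insertBy]

-- insertBy appends at the end when it never goes before anything
theorem insertBy_end (before : String → String → Bool) (x : String) (l : List String)
    (h : ∀ y ∈ l, before x y = false) :
    PySem.List.insertBy before x l = l ++ [x] := by
  induction l with
  | nil => simp [PySem.List.insertBy]
  | cons a l ih =>
    simp only [PySem.List.insertBy]
    rw [h a (List.mem_cons_self), ih (fun y hy => h y (List.mem_cons_of_mem _ hy))]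
    simp

-- B's stable sort by the dash key is exactly stable partition: dashes first, non-dashes after,
-- each in original order.
theorem sortedFold_partition (seg d n : List String)
    (hd : ∀ y ∈ d, y = "-") (hn : ∀ y ∈ n, y ≠ "-") :
    seg.foldl (fun acc x =>
        PySem.List.insertBy (fun a b => decide (dashKey a < dashKey b)) x acc) (d ++ n)
      = (d ++ seg.filter (fun x => x = "-")) ++ (n ++ seg.filter (fun x => x ≠ "-")) := by
  induction seg generalizing d n with
  | nil => simp
  | cons x s ih =>
    rw [List.foldl_cons]
    by_cases hx : x = "-"
    · have hstep : PySem.List.insertBy (fun a b => decide (dashKey a < dashKey b)) x (d ++ n)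
          = (d ++ [x]) ++ n := by
        rw [insertBy_skip _ _ d n (by intro y hy; simp [dashKey, hx, hd y hy])]
        cases n with
        | nil => simp [PySem.List.insertBy]
        | cons b nb =>
          have hb : dashKey x < dashKey b := by
            simp [dashKey, hx, hn b (List.mem_cons_self)]
          simp [PySem.List.insertBy, hb]
      rw [hstep, ih (d ++ [x]) n
        (by intro y hy; rcases List.mem_append.mp hy with h | h
            · exact hd y h
            · simpa [hx] using List.mem_singleton.mp h) hn]
      simp [hx]
    · have hstep : PySem.List.insertBy (fun a b => decide (dashKey a < dashKey b)) x (d ++ n)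
          = d ++ (n ++ [x]) := by
        rw [insertBy_end _ _ (d ++ n)
          (by intro y hy
              rcases List.mem_append.mp hy with h | h
              · simp [dashKey, hx, hd y h]
              · simp [dashKey, hx, hn y h])]
        simp
      rw [hstep, ih d (n ++ [x]) hd
        (by intro y hy; rcases List.mem_append.mp hy with h | h
            · exact hn y h
            · simpa using List.mem_singleton.mp h ▸ hx)]
      simp [hx]

theorem sorted_dash_partition (seg : List String) :
    PySem.List.sorted seg dashKey false
      = seg.filter (fun x => x = "-") ++ seg.filter (fun x => x ≠ "-") := by
  have := sortedFold_partition seg [] [] (by simp) (by simp)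
  simpa [PySem.List.sorted] using this

-- joining the dash block gives the replicated dashes
theorem join_filter_dash (seg : List String) :
    PySem.Str.join "" (seg.filter (fun x => x = "-"))
      = String.ofList (List.replicate (seg.count "-") '-') := by
  induction seg with
  | nil => simp [sjoin_nil]
  | cons a s ih =>
    by_cases ha : a = "-"
    · subst ha
      rw [List.filter_cons_of_pos (by simp), sjoin_cons, ih]
      apply String.toList_inj.mp
      simp [List.count_cons, List.replicate_succ]
    · rw [List.filter_cons_of_neg (by simpa using ha), ih]
      simp [List.count_cons, ha]

-- A's inner loop: dashes accumulate in front, non-dashes join in order behind the seed.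
theorem innerA_eq (seg : List String) (t : String) :
    seg.foldl (fun t j => if j = "-" then "-" ++ t else t ++ j) t
      = String.ofList (List.replicate (seg.count "-") '-') ++ t ++ PySem.Str.join "" (seg.filter (fun x => x ≠ "-")) := by
  induction seg generalizing t with
  | nil => apply String.toList_inj.mp; simp [sjoin_nil]
  | cons j seg ih =>
    by_cases hj : j = "-"
    · subst hj
      rw [List.foldl_cons, if_pos rfl, ih]
      apply String.toList_inj.mp
      simp [List.replicate_succ']
    · rw [List.foldl_cons, if_neg hj, ih]
      apply String.toList_inj.mp
      simp [hj, sjoin_cons, PySem.Str.toList_join]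

-- the string B contributes for one segment
def segB (seg : List String) : String :=
  let temp := PySem.Str.join "" (PySem.List.sorted seg dashKey false)
  if PySem.Str.pyGet? temp 0 = some '-' then temp else "+" ++ temp

-- B's temp equals the replicate-dashes ++ join-nondash form
theorem tempB_eq (seg : List String) :
    PySem.Str.join "" (PySem.List.sorted seg dashKey false)
      = String.ofList (List.replicate (seg.count "-") '-')
        ++ PySem.Str.join "" (seg.filter (fun x => x ≠ "-")) := by
  rw [sorted_dash_partition, sjoin_append, join_filter_dash]

-- A's one step appends exactly B's per-segment string
theorem stepA_eq (s : String) (i : List String) :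
    (if PySem.Str.pyGet? (i.foldl (fun t j => if j = "-" then "-" ++ t else t ++ j) "") 0 = some '-'
      then s ++ i.foldl (fun t j => if j = "-" then "-" ++ t else t ++ j) ""
      else s ++ "+" ++ i.foldl (fun t j => if j = "-" then "-" ++ t else t ++ j) "")
      = s ++ segB i := by
  have ht : i.foldl (fun t j => if j = "-" then "-" ++ t else t ++ j) ""
      = PySem.Str.join "" (PySem.List.sorted i dashKey false) := by
    rw [innerA_eq, tempB_eq]; apply String.toList_inj.mp; simp
  rw [ht]
  simp only [segB]
  by_cases hc : PySem.Str.pyGet? (PySem.Str.join "" (PySem.List.sorted i dashKey false)) 0 = some '-'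
  · rw [if_pos hc, if_pos hc]
  · rw [if_neg hc, if_neg hc]
    apply String.toList_inj.mp; simp

-- A's outer loop appends exactly B's per-segment strings
theorem outerA_eq (rest : List (List String)) (s : String) :
    rest.foldl (fun result i =>
      let temp := i.foldl (fun t j => if j = "-" then "-" ++ t else t ++ j) ""
      if PySem.Str.pyGet? temp 0 = some '-' then result ++ temp
      else result ++ "+" ++ temp) s
      = s ++ PySem.Str.join "" (rest.map segB) := by
  induction rest generalizing s with
  | nil => rw [List.foldl_nil, List.map_nil, sjoin_nil]; apply String.toList_inj.mp; simp
  | cons i rest ih =>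
    simp only [List.foldl_cons, List.map_cons]
    rw [ih, sjoin_cons]
    simp only [stepA_eq]
    apply String.toList_inj.mp; simp

-- B's outer loop builds the list rest.map segB
theorem outerB_eq (rest : List (List String)) (ps : List String) :
    rest.foldl (fun pieces seg =>
      let temp := PySem.Str.join ""
        (PySem.List.sorted seg dashKey false)
      pieces ++ [if PySem.Str.pyGet? temp 0 = some '-' then temp else "+" ++ temp]) ps
      = ps ++ rest.map segB := by
  induction rest generalizing ps with
  | nil => simp
  | cons i rest ih =>
    simp only [List.foldl_cons, List.map_cons]
    rw [ih]
    simp [segB]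

-- ===== VERDICT (by name: the statement is the Claim_ definition above) =====
theorem reconstruct_operations_spec : Claim_equal_reconstruct_operations := by
  intro rpn_list _ _
  unfold Spec_reconstruct_operations reconstruct_operations reconstruct_operations_alt
  cases rpn_list with
  | nil => rfl
  | cons h rest =>
    simp only [outerA_eq, outerB_eq, List.nil_append]
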